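-- pv_equiv track=rewrite | github.com/ckoons/BubbleSpacetimeTheory | play/toy_353_first_moment_backbone.py | count_solutions_exact
-- ===== SOURCE A (Python) =====
-- def count_solutions_exact(cvars, csigns, n):
--     """Count all satisfying assignments by exhaustive enumeration.
--     Only feasible for n ≤ 20."""
--     count = 0
--     solutions = []
--     for bits in range(2**n):
--         assignment = [(bits >> i) & 1 for i in range(n)]
--         sat = True
--         for vs, ss in zip(cvars, csigns):
--             clause_sat = False
--             for v, s in zip(vs, ss):
--                 if assignment[v] ^ s == 1:
--                     clause_sat = True
--                     break
--             if not clause_sat: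
--                 sat = False
--                 break
--         if sat:
--             count += 1
--             solutions.append(list(assignment))
--     return count, solutions
-- ===== SOURCE B (Python) =====
-- def count_solutions_exact(cvars, csigns, n):
--     """Recursive backtracking: assign variables from the highest index down,
--     evaluate each clause as soon as all of its variables have values, and
--     prune any branch that has already falsified a clause."""
--     clauses = [list(zip(vs, ss)) for vs, ss in zip(cvars, csigns)]
--     assignment = [None] * n
--     count = 0
--     solutions = []
--
--     def assigned(v):
--         return assignment[v] is not None
--
--     def search(k, pending):
--         nonlocal count
--         ready = [c for c in pending if all(assigned(v) for v, _ in c)]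
--         if any(not any(assignment[v] ^ s == 1 for v, s in c) for c in ready):
--             return
--         if k == 0:
--             count += 1
--             solutions.append(list(assignment))
--             return
--         rest = [c for c in pending if not all(assigned(v) for v, _ in c)]
--         for b in (0, 1):
--             assignment[k - 1] = b
--             search(k - 1, rest)
--         assignment[k - 1] = None
--
--     search(n, clauses)
--     return count, solutions
-- ===== Notes on version B (the rewrite author's own statement) =====
-- stated objective: alternative
-- what changed: Replaces the flat enumeration of all 2**n bit patterns (with per-pattern bit extraction and a full clause scan) by a recursive backtracking search over a partial assignment that assigns variables n-1 down to 0, evaluates each clause as soon as all of its variables have values, and prunes falsified branches; Pre_ restricts clause variable indices to [-n, n) (and n >= 0), outside which A raises IndexError on almost all inputs (A can still return when an earlier literal short-circuits every scan, but B's partial-assignment check raises there).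
-- outside the precondition, e.g. on count_solutions_exact([[0, 0, 5]], [[1, 0, 9]], 1): A returns (2, [[0], [1]]), B raises IndexError
import Mathlib
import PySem

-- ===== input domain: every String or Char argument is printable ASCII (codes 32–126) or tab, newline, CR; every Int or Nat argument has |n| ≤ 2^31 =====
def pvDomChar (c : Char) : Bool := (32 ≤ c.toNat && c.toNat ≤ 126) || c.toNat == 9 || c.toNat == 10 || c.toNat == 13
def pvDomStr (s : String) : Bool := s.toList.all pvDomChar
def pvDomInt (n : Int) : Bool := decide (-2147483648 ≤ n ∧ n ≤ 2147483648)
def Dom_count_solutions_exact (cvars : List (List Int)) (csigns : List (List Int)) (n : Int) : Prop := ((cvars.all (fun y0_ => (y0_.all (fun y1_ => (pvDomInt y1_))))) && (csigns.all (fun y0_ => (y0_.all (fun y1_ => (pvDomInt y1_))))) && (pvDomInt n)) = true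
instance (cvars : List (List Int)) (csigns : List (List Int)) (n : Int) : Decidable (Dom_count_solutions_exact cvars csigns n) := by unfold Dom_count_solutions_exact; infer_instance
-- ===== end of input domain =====

-- ===== PORT A =====
-- A enumerates all 2^n bit patterns; B is a recursive backtracking search over a
-- partial assignment with clause-level pruning (objective: alternative algorithm).

-- inner 'for v, s in zip(vs, ss): … break' loop (clause_sat)
def pvClauseLoopA (assignment : List Int) : List (Int × Int) → Bool
  | [] => false
  | (v, s) :: rest =>
    -- assignment[v] ^ s == 1 ; IndexError (v out of range) is excluded by Pre_
    if PySem.Int.bxor (PySem.List.pyGetD assignment v 0) s == 1 then true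
    else pvClauseLoopA assignment rest

-- outer 'for vs, ss in zip(cvars, csigns): … break' loop (sat)
def pvSatLoopA (assignment : List Int) : List (List Int × List Int) → Bool
  | [] => true
  | (vs, ss) :: rest =>
    if pvClauseLoopA assignment (vs.zip ss) then pvSatLoopA assignment rest else false

def count_solutions_exact (cvars : List (List Int)) (csigns : List (List Int)) (n : Int) : Int × List (List Int) :=
  -- range(2**n): Python raises TypeError for n < 0 (2**n is a float); Pre_ has 0 ≤ n, so 2**n = 2^n.toNat
  (PySem.List.pyRange 0 ((2 : Int) ^ n.toNat) 1).foldl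
    (fun acc bits =>
      -- [(bits >> i) & 1 for i in range(n)]; i ≥ 0 so 'bits >> i' is 'bits >>> i.toNat'
      let assignment := (PySem.List.pyRange 0 n 1).map (fun i => PySem.Int.band (bits >>> i.toNat) 1)
      if pvSatLoopA assignment (cvars.zip csigns) then (acc.1 + 1, acc.2 ++ [assignment])
      else acc)
    (0, [])

-- ===== PORT B =====
-- the partial assignment is a list of Option Int ([None] * n); assigned(v) test
def pvReadyB (asg : List (Option Int)) (c : List (Int × Int)) : Bool :=
  c.all (fun l => (PySem.List.pyGetD asg l.1 none).isSome)

-- assignment[v] ^ s == 1; a clause is only evaluated when ready, so the entry is 'some'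
-- (the 'none' branch is unreachable under Pre_)
def pvLitB (asg : List (Option Int)) (l : Int × Int) : Bool :=
  match PySem.List.pyGetD asg l.1 none with
  | some x => PySem.Int.bxor x l.2 == 1
  | none => false

-- def search(k, pending): …; the (count, solutions) accumulation is returned
def pvSearchB : Nat → List (List (Int × Int)) → List (Option Int) → Int × List (List Int)
  | 0, pending, asg =>
    if (pending.filter (pvReadyB asg)).any (fun c => !(c.any (pvLitB asg))) then (0, [])
    -- solutions.append(list(assignment)): at a leaf every entry is assigned
    else (1, [asg.map (fun o => o.getD 0)])
  | j + 1, pending, asg =>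
    if (pending.filter (pvReadyB asg)).any (fun c => !(c.any (pvLitB asg))) then (0, [])
    else
      let rest := pending.filter (fun c => !(pvReadyB asg c))
      -- for b in (0, 1): assignment[k - 1] = b; search(k - 1, rest)
      let r0 := pvSearchB j rest (asg.set j (some 0))
      let r1 := pvSearchB j rest (asg.set j (some 1))
      (r0.1 + r1.1, r0.2 ++ r1.2)

def count_solutions_exact_alt (cvars : List (List Int)) (csigns : List (List Int)) (n : Int) : Int × List (List Int) :=
  let clauses := (cvars.zip csigns).map (fun p => p.1.zip p.2)
  -- search(n, clauses) with assignment = [None] * n; n ≥ 0 under Pre_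
  pvSearchB n.toNat clauses (List.replicate n.toNat none)

-- ===== PRECONDITION & SPEC =====
-- Pre_ excludes inputs where A raises: n < 0 (TypeError in range(2**n)) and clauses whose
-- variable index is outside [-n, n) (IndexError).  It is slightly narrower than "A returns":
-- it also excludes inputs where an out-of-range index is never reached only because an
-- earlier literal of the clause short-circuits every scan (see claim.json cites).
def Pre_count_solutions_exact (cvars : List (List Int)) (csigns : List (List Int)) (n : Int) : Prop :=
  0 ≤ n ∧ ∀ p ∈ cvars.zip csigns, ∀ l ∈ p.1.zip p.2, -n ≤ l.1 ∧ l.1 < n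
instance (cvars : List (List Int)) (csigns : List (List Int)) (n : Int) : Decidable (Pre_count_solutions_exact cvars csigns n) := by unfold Pre_count_solutions_exact; infer_instance

def pvWitness_count_solutions_exact : List (List Int) × List (List Int) × Int :=
  ([[0, 1], [1, -2]], [[1, 0], [0, 1]], 2)

def Spec_count_solutions_exact (cvars : List (List Int)) (csigns : List (List Int)) (n : Int) (out : Int × List (List Int)) : Prop := out = count_solutions_exact_alt cvars csigns n
instance (cvars : List (List Int)) (csigns : List (List Int)) (n : Int) (out : Int × List (List Int)) : Decidable (Spec_count_solutions_exact cvars csigns n out) := by unfold Spec_count_solutions_exact; infer_instance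

-- ===== CLAIM (what is proved, stated in full; the proofs are below) =====
def Claim_equal_count_solutions_exact : Prop := ∀ (cvars : List (List Int)) (csigns : List (List Int)) (n : Int), Dom_count_solutions_exact cvars csigns n → Pre_count_solutions_exact cvars csigns n → Spec_count_solutions_exact cvars csigns n (count_solutions_exact cvars csigns n)

-- ===== LEMMAS AND PROOFS =====

-- common vocabulary
def pvLitT (a : List Int) (l : Int × Int) : Bool :=
  PySem.Int.bxor (PySem.List.pyGetD a l.1 0) l.2 == 1

def pvEvalC (a : List Int) (lits : List (Int × Int)) : Bool := lits.any (pvLitT a)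

def pvAsgN (N : Nat) (bits : Int) : List Int :=
  (List.range N).map (fun (i : Nat) => PySem.Int.band (bits >>> i) 1)

def pvAsc : Nat → List (List Int)
  | 0 => [[]]
  | k + 1 => (pvAsc k).map (· ++ [(0 : Int)]) ++ (pvAsc k).map (· ++ [(1 : Int)])

def pvPack (L : List (List Int)) : Int × List (List Int) := ((L.length : Int), L)

-- level of a clause: the smallest wrapped index it mentions (n for an empty clause)
def pvLevelB (n : Int) (lits : List (Int × Int)) : Int :=
  (PySem.List.min? (lits.map (fun l => PySem.Int.mod l.1 n)) (fun x => x)).getD n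

-- the partial assignment at a node: k unassigned variables, then the chosen tail
def pvAsgOf (k : Nat) (tail : List Int) : List (Option Int) :=
  List.replicate k none ++ tail.map some

-- "all clauses of level ≤ k are satisfied by a"
def pvBelowLe (cls : List (List (Int × Int))) (n : Int) (k : Nat) (a : List Int) : Bool :=
  cls.all (fun c => !(decide (pvLevelB n c ≤ (k : Int))) || pvEvalC a c)

theorem pv_clauseLoop_eq (a : List Int) (L : List (Int × Int)) :
    pvClauseLoopA a L = pvEvalC a L := by
  induction L with
  | nil => rfl
  | cons l rest ih =>
    obtain ⟨v, s⟩ := l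
    by_cases h : PySem.Int.bxor (PySem.List.pyGetD a v 0) s == 1 <;>
      simp [pvClauseLoopA, pvEvalC, pvLitT, h, ih]

theorem pv_satLoop_eq (a : List Int) (P : List (List Int × List Int)) :
    pvSatLoopA a P = P.all (fun p => pvEvalC a (p.1.zip p.2)) := by
  induction P with
  | nil => rfl
  | cons p rest ih =>
    obtain ⟨vs, ss⟩ := p
    by_cases h : pvEvalC a (vs.zip ss) = true <;>
      simp [pvSatLoopA, pv_clauseLoop_eq, ih, h]

theorem pv_foldA {α : Type} (xs : List α) (c : Int) (s : List (List Int)) (p : List Int → Bool)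
    (f : α → List Int) :
    xs.foldl (fun acc bits => if p (f bits) then (acc.1 + 1, acc.2 ++ [f bits]) else acc) (c, s)
      = (c + (((xs.filter (fun b => p (f b))).length : Nat) : Int),
         s ++ (xs.filter (fun b => p (f b))).map f) := by
  induction xs generalizing c s with
  | nil => simp
  | cons x t ih =>
    by_cases h : p (f x) = true <;>
      simp [List.foldl_cons, h, ih, Int.add_comm, Int.add_assoc]

theorem pv_bit (m i : Nat) :
    PySem.Int.band ((m : Int) >>> i) 1 = ((m / 2 ^ i % 2 : Nat) : Int) := by
  rw [← Int.natCast_shiftRight]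
  have h := PySem.Int.band_natCast (m >>> i) 1
  simpa [Nat.shiftRight_eq_div_pow, Nat.and_one_is_mod] using h

theorem pvAsgN_eq (N : Nat) (m : Nat) :
    pvAsgN N (m : Int) = (List.range N).map (fun i => ((m / 2 ^ i % 2 : Nat) : Int)) := by
  unfold pvAsgN
  exact List.map_congr_left (fun i _ => pv_bit m i)

theorem pv_asgN_low (k : Nat) (r : Nat) (hr : r < 2 ^ k) :
    pvAsgN (k + 1) (r : Int) = pvAsgN k (r : Int) ++ [0] := by
  rw [pvAsgN_eq, pvAsgN_eq, List.range_succ, List.map_append]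
  have h0 : r / 2 ^ k % 2 = 0 := by rw [Nat.div_eq_of_lt hr]
  simp only [List.map_cons, List.map_nil, h0, Nat.cast_zero]

theorem pv_bits_high (k r i : Nat) (hi : i < k) :
    (2 ^ k + r) / 2 ^ i % 2 = r / 2 ^ i % 2 := by
  have e : 2 ^ k + r = r + 2 ^ (k - i - 1) * 2 * 2 ^ i := by
    have : 2 ^ (k - i - 1) * 2 * 2 ^ i = 2 ^ (k - i - 1 + 1 + i) := by
      rw [pow_add, pow_add]; ring
    rw [this]
    have : k - i - 1 + 1 + i = k := by omega
    rw [this]; omega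
  rw [e, Nat.add_mul_div_right _ _ (Nat.pos_of_ne_zero (by positivity))]
  omega

theorem pv_asgN_high (k : Nat) (r : Nat) (hr : r < 2 ^ k) :
    pvAsgN (k + 1) ((2 ^ k + r : Nat) : Int) = pvAsgN k (r : Int) ++ [1] := by
  have htop : (2 ^ k + r) / 2 ^ k % 2 = 1 := by
    have h1 : 2 ^ k + r = r + 1 * 2 ^ k := by ring
    rw [h1, Nat.add_mul_div_right _ _ (Nat.pos_of_ne_zero (by positivity)),
        Nat.div_eq_of_lt hr]
  rw [pvAsgN_eq, pvAsgN_eq, List.range_succ, List.map_append]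
  congr 1
  · exact List.map_congr_left (fun i hi => by
      rw [pv_bits_high k r i (List.mem_range.mp hi)])
  · simp only [List.map_cons, List.map_nil, htop, Nat.cast_one]

theorem pv_rangeMap (k : Nat) :
    (List.range (2 ^ k)).map (fun (r : Nat) => pvAsgN k (r : Int)) = pvAsc k := by
  induction k with
  | zero => simp [pvAsc, pvAsgN]
  | succ k ih =>
    have h2 : 2 ^ (k + 1) = 2 ^ k + 2 ^ k := by ring
    rw [h2, List.range_add, List.map_append, List.map_map, pvAsc, ← ih]
    congr 1
    · rw [List.map_map]
      exact List.map_congr_left (fun r hr => pv_asgN_low k r (List.mem_range.mp hr))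
    · rw [List.map_map]
      exact List.map_congr_left (fun r hr => by
        have := pv_asgN_high k r (List.mem_range.mp hr)
        simp only [Function.comp_apply]
        exact_mod_cast this)

theorem pv_map_filter {α β : Type} (xs : List α) (f : α → β) (p : β → Bool) :
    (xs.filter (fun b => p (f b))).map f = (xs.map f).filter p := by
  simpa [Function.comp_def] using (List.filter_map (f := f) (p := p) (l := xs)).symm

theorem pv_A_eq (cvars csigns : List (List Int)) (n : Int) (_hn : 0 ≤ n) :
    count_solutions_exact cvars csigns n
      = pvPack ((pvAsc n.toNat).filter
          (fun a => (cvars.zip csigns).all (fun p => pvEvalC a (p.1.zip p.2)))) := by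
  have hasg : ∀ bits : Int,
      (PySem.List.pyRange 0 n 1).map (fun (i : Int) => PySem.Int.band (bits >>> i.toNat) 1)
        = pvAsgN n.toNat bits := by
    intro bits
    rw [PySem.List.pyRange_one, List.map_map]
    simp only [sub_zero]
    unfold pvAsgN
    exact List.map_congr_left (fun k _ => by norm_num)
  have h2n : ((2 : Int) ^ n.toNat) = ((2 ^ n.toNat : Nat) : Int) := by push_cast; rfl
  unfold count_solutions_exact
  rw [h2n, PySem.List.pyRange_zero_natCast]
  simp only [hasg]
  rw [List.foldl_map]
  rw [pv_foldA (List.range (2 ^ n.toNat)) 0 []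
        (fun a => pvSatLoopA a (cvars.zip csigns))
        (fun (r : Nat) => pvAsgN n.toNat (r : Int))]
  have hmf := pv_map_filter (List.range (2 ^ n.toNat))
      (fun (r : Nat) => pvAsgN n.toNat (r : Int))
      (fun a => pvSatLoopA a (cvars.zip csigns))
  have hlen := congrArg List.length hmf
  rw [List.length_map] at hlen
  rw [pv_rangeMap] at hmf
  have hfc : (pvAsc n.toNat).filter (fun a => pvSatLoopA a (cvars.zip csigns))
      = (pvAsc n.toNat).filter
          (fun a => (cvars.zip csigns).all (fun p => pvEvalC a (p.1.zip p.2))) :=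
    List.filter_congr (fun a _ => pv_satLoop_eq a (cvars.zip csigns))
  unfold pvPack
  rw [← hfc, ← hmf, hlen]
  simp
  exact hlen.symm

theorem pv_getD_wrap {α : Type} (xs : List α) (v : Int) (d : α)
    (h1 : -(xs.length : Int) ≤ v) (h2 : v < (xs.length : Int)) :
    PySem.List.pyGetD xs v d = xs.getD (v % (xs.length : Int)).toNat d := by
  by_cases hv : 0 ≤ v
  · have he : v % (xs.length : Int) = v := Int.emod_eq_of_lt hv h2
    rw [PySem.List.pyGetD_eq_getElem xs d hv h2, he,
        List.getD_eq_getElem _ _ (by omega)]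
  · have hL0 : (0 : Int) < (xs.length : Int) := by omega
    have he : v % (xs.length : Int) = v + (xs.length : Int) := by
      have h3 := Int.add_mul_emod_self_left v (xs.length : Int) 1
      rw [mul_one] at h3
      calc v % (xs.length : Int) = (v + (xs.length : Int)) % (xs.length : Int) := h3.symm
        _ = v + (xs.length : Int) := Int.emod_eq_of_lt (by omega) (by omega)
    have hk1 : 0 < (-v).toNat := by omega
    have hk2 : (-v).toNat ≤ xs.length := by omega
    have hkv : v = -(((-v).toNat : Nat) : Int) := by omega
    conv_lhs => rw [hkv]
    rw [PySem.List.pyGetD_neg_natCast xs (-v).toNat d hk1 hk2,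
        List.getD_eq_getElem _ _ (by omega)]
    congr 1
    omega

theorem pv_level_min (n : Int) (lits : List (Int × Int)) (l : Int × Int) (hl : l ∈ lits) :
    pvLevelB n lits ≤ PySem.Int.mod l.1 n := by
  unfold pvLevelB
  cases hm : PySem.List.min? (lits.map (fun l => PySem.Int.mod l.1 n)) (fun x => x) with
  | none =>
    have := (PySem.List.min?_eq_none_iff _ _).mp hm
    simp [List.map_eq_nil_iff] at this
    subst this
    simp at hl
  | some m =>
    have hmem : PySem.Int.mod l.1 n ∈ lits.map (fun l => PySem.Int.mod l.1 n) :=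
      List.mem_map_of_mem hl
    simpa using PySem.List.min?_isMin hm _ hmem

theorem pv_level_nonneg (n : Int) (hn : 0 ≤ n) (lits : List (Int × Int))
    (h : ∀ l ∈ lits, -n ≤ l.1 ∧ l.1 < n) : 0 ≤ pvLevelB n lits := by
  unfold pvLevelB
  cases hm : PySem.List.min? (lits.map (fun l => PySem.Int.mod l.1 n)) (fun x => x) with
  | none => simpa using hn
  | some m =>
    have hmem := PySem.List.min?_mem hm
    obtain ⟨l, hl, hlm⟩ := List.mem_map.mp hmem
    obtain ⟨h1, h2⟩ := h l hl
    have hn0 : (0 : Int) < n := by omega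
    simpa [← hlm] using PySem.Int.mod_nonneg l.1 hn0

theorem pv_level_le (n : Int) (hn : 0 ≤ n) (lits : List (Int × Int))
    (h : ∀ l ∈ lits, -n ≤ l.1 ∧ l.1 < n) : pvLevelB n lits ≤ n := by
  unfold pvLevelB
  cases hm : PySem.List.min? (lits.map (fun l => PySem.Int.mod l.1 n)) (fun x => x) with
  | none => simp
  | some m =>
    have hmem := PySem.List.min?_mem hm
    obtain ⟨l, hl, hlm⟩ := List.mem_map.mp hmem
    obtain ⟨h1, h2⟩ := h l hl
    have hn0 : (0 : Int) < n := by omega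
    have hlt := PySem.Int.mod_lt l.1 hn0
    rw [show PySem.Int.mod l.1 n = m from hlm] at hlt
    simp
    omega

theorem pv_set_asg (k : Nat) (L : List (Option Int)) (x : Option Int) :
    (List.replicate (k + 1) (none : Option Int) ++ L).set k x
      = List.replicate k none ++ x :: L := by
  induction k with
  | zero => simp
  | succ k ih => simpa [List.replicate_succ] using ih

theorem pv_getD_asg (n : Int) (k : Nat) (tail : List Int) (v : Int)
    (hlen : k + tail.length = n.toNat) (h1 : -n ≤ v) (h2 : v < n) :
    PySem.List.pyGetD (pvAsgOf k tail) v none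
      = if (k : Int) ≤ v % n then some (tail.getD ((v % n).toNat - k) 0) else none := by
  have hn0 : (0 : Int) < n := by omega
  have hL : ((pvAsgOf k tail).length : Int) = n := by
    simp [pvAsgOf]; omega
  rw [pv_getD_wrap (pvAsgOf k tail) v none (by omega) (by omega), hL]
  unfold pvAsgOf
  unfold pvAsgOf at hL
  have hm0 : 0 ≤ v % n := Int.emod_nonneg _ (by omega)
  have hml : v % n < n := Int.emod_lt_of_pos _ hn0
  have hit : (v % n).toNat < n.toNat := by omega
  by_cases hc : (k : Int) ≤ v % n
  · rw [if_pos hc]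
    rw [List.getD_append_right _ _ _ _ (by simp; omega)]
    have hlt : (v % n).toNat - (List.replicate k (none : Option Int)).length < tail.length := by
      simp; omega
    rw [List.getD_eq_getElem _ _ (by simpa using hlt), List.getElem_map,
        List.getD_eq_getElem _ _ (by simp at hlt ⊢; omega)]
    simp
  · rw [if_neg hc]
    have hlt : (v % n).toNat < (List.replicate k (none : Option Int)).length := by
      simp; omega
    rw [List.getD_append _ _ _ _ hlt, List.getD_eq_getElem _ _ hlt]
    simp

theorem pv_all_congr {α : Type} {l : List α} {f g : α → Bool}
    (h : ∀ x ∈ l, f x = g x) : l.all f = l.all g := by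
  induction l with
  | nil => rfl
  | cons x t ih => simp_all

theorem pv_all_and {α : Type} (l : List α) (p q : α → Bool) :
    l.all (fun x => p x && q x) = (l.all p && l.all q) := by
  induction l with
  | nil => rfl
  | cons x t ih =>
    simp only [List.all_cons, ih]
    cases p x <;> cases q x <;> simp

theorem pv_any_not {α : Type} (l : List α) (f : α → Bool) :
    l.any (fun x => !(f x)) = !(l.all f) := by
  induction l with
  | nil => rfl
  | cons x t ih => cases h : f x <;> simp [h, ih]

theorem pv_ready_eq (n : Int) (k : Nat) (tail : List Int) (c : List (Int × Int))
    (hn : 0 ≤ n) (hk : k ≤ n.toNat) (hlen : k + tail.length = n.toNat)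
    (hr : ∀ l ∈ c, -n ≤ l.1 ∧ l.1 < n) :
    pvReadyB (pvAsgOf k tail) c = decide ((k : Int) ≤ pvLevelB n c) := by
  unfold pvReadyB
  have hlit : ∀ l ∈ c, (PySem.List.pyGetD (pvAsgOf k tail) l.1 none).isSome
      = decide ((k : Int) ≤ PySem.Int.mod l.1 n) := by
    intro l hl
    obtain ⟨h1, h2⟩ := hr l hl
    have hn0 : (0 : Int) < n := by omega
    rw [pv_getD_asg n k tail l.1 hlen h1 h2, PySem.Int.mod_eq_emod_of_pos hn0]
    by_cases h : (k : Int) ≤ l.1 % n <;> simp [h]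
  rw [pv_all_congr hlit]
  by_cases hlev : (k : Int) ≤ pvLevelB n c
  · rw [decide_eq_true hlev, List.all_eq_true]
    intro l hl
    have := pv_level_min n c l hl
    simp; omega
  · rw [decide_eq_false hlev]
    unfold pvLevelB at hlev
    cases hm : PySem.List.min? (c.map (fun l => PySem.Int.mod l.1 n)) (fun x => x) with
    | none =>
      rw [hm] at hlev
      have hcn := (PySem.List.min?_eq_none_iff _ _).mp hm
      simp [List.map_eq_nil_iff] at hcn
      subst hcn
      simp at hlev
      omega
    | some m =>
      rw [hm] at hlev
      simp at hlev
      have hmem := PySem.List.min?_mem hm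
      obtain ⟨l, hl, hlm⟩ := List.mem_map.mp hmem
      refine List.all_eq_false.mpr ⟨l, hl, ?_⟩
      simp [hlm]
      omega

theorem pv_eval_ready (n : Int) (k : Nat) (tail p : List Int) (c : List (Int × Int))
    (hp : p.length = k) (hlen : k + tail.length = n.toNat)
    (hr : ∀ l ∈ c, -n ≤ l.1 ∧ l.1 < n)
    (hready : (k : Int) ≤ pvLevelB n c) :
    pvEvalC (p ++ tail) c = c.any (pvLitB (pvAsgOf k tail)) := by
  unfold pvEvalC
  refine PySem.List.any_congr_mem (fun l hl => ?_)
  obtain ⟨h1, h2⟩ := hr l hl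
  have hn0 : (0 : Int) < n := by omega
  have hkm : (k : Int) ≤ l.1 % n := by
    have := pv_level_min n c l hl
    rw [PySem.Int.mod_eq_emod_of_pos hn0] at this
    omega
  have hm0 : 0 ≤ l.1 % n := Int.emod_nonneg _ (by omega)
  have hml : l.1 % n < n := Int.emod_lt_of_pos _ hn0
  have hLA : ((p ++ tail).length : Int) = n := by
    simp [hp]; omega
  unfold pvLitT pvLitB
  rw [pv_getD_asg n k tail l.1 hlen h1 h2, if_pos hkm]
  rw [pv_getD_wrap (p ++ tail) l.1 0 (by omega) (by omega), hLA]
  rw [List.getD_append_right _ _ _ _ (by omega)]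
  simp [hp]

theorem pv_asc_len (k : Nat) : ∀ a ∈ pvAsc k, a.length = k := by
  induction k with
  | zero => simp [pvAsc]
  | succ k ih =>
    intro a ha
    simp only [pvAsc, List.mem_append, List.mem_map] at ha
    rcases ha with ⟨p, hp, rfl⟩ | ⟨p, hp, rfl⟩ <;> simp [ih p hp]




theorem pv_ready_filter (cls : List (List (Int × Int))) (n : Int) (hn : 0 ≤ n)
    (H : ∀ c ∈ cls, ∀ l ∈ c, -n ≤ l.1 ∧ l.1 < n)
    (k : Nat) (tail : List Int) (hk : k ≤ n.toNat) (hlen : k + tail.length = n.toNat) :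
    (cls.filter (fun c => decide (pvLevelB n c ≤ (k : Int)))).filter
        (pvReadyB (pvAsgOf k tail))
      = cls.filter (fun c => decide (pvLevelB n c = (k : Int))) := by
  rw [List.filter_filter]
  refine List.filter_congr (fun c hc => ?_)
  rw [pv_ready_eq n k tail c hn hk hlen (H c hc)]
  by_cases h : pvLevelB n c = (k : Int)
  · simp [h]
  · by_cases h2 : pvLevelB n c ≤ (k : Int) <;> simp [h, h2]
    omega

theorem pv_searchSpec (cls : List (List (Int × Int))) (n : Int) (hn : 0 ≤ n)
    (H : ∀ c ∈ cls, ∀ l ∈ c, -n ≤ l.1 ∧ l.1 < n) :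
    ∀ (k : Nat) (tail : List Int), k ≤ n.toNat → tail.length = n.toNat - k →
    pvSearchB k (cls.filter (fun c => decide (pvLevelB n c ≤ (k : Int)))) (pvAsgOf k tail)
      = pvPack (((pvAsc k).map (· ++ tail)).filter (pvBelowLe cls n k)) := by
  intro k
  induction k with
  | zero =>
    intro tail hk hlen
    have hlen' : 0 + tail.length = n.toNat := by omega
    have hAF := pv_ready_filter cls n hn H 0 tail hk hlen'
    have hEv : ∀ c ∈ cls.filter (fun c => decide (pvLevelB n c = ((0 : Nat) : Int))),
        c.any (pvLitB (pvAsgOf 0 tail)) = pvEvalC tail c := by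
      intro c hc
      obtain ⟨hcm, hcl⟩ := List.mem_filter.mp hc
      have := pv_eval_ready n 0 tail [] c rfl hlen' (H c hcm)
        (by simp at hcl; omega)
      simpa using this.symm
    have hB : pvBelowLe cls n 0 tail
        = (cls.filter (fun c => decide (pvLevelB n c = ((0 : Nat) : Int)))).all
            (fun c => c.any (pvLitB (pvAsgOf 0 tail))) := by
      rw [List.all_filter]
      unfold pvBelowLe
      refine pv_all_congr (fun c hc => ?_)
      have h0 := pv_level_nonneg n hn c (H c hc)
      have he : decide (pvLevelB n c ≤ ((0 : Nat) : Int))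
          = decide (pvLevelB n c = ((0 : Nat) : Int)) := by
        by_cases h : pvLevelB n c = ((0 : Nat) : Int) <;> simp [h]
        omega
      rw [he]
      by_cases h : pvLevelB n c = ((0 : Nat) : Int)
      · rw [hEv c (List.mem_filter.mpr ⟨hc, by simp [h]⟩)]
      · have h' : ¬ pvLevelB n c = (0 : Int) := by exact_mod_cast h
        simp [h']
    show (if _ then _ else _) = _
    rw [hAF, pv_any_not, ← hB]
    by_cases hb : pvBelowLe cls n 0 tail = true
    · rw [hb]
      simp [pvAsc, pvPack, pvAsgOf, hb]
    · rw [Bool.not_eq_true] at hb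
      rw [hb]
      simp [pvAsc, pvPack, hb]
  | succ j ih =>
    intro tail hk hlen
    have hlen' : (j + 1) + tail.length = n.toNat := by omega
    have hAF := pv_ready_filter cls n hn H (j + 1) tail hk hlen'
    -- rest = clauses of level ≤ j
    have hRest : (cls.filter (fun c => decide (pvLevelB n c ≤ ((j + 1 : Nat) : Int)))).filter
        (fun c => !(pvReadyB (pvAsgOf (j + 1) tail) c))
        = cls.filter (fun c => decide (pvLevelB n c ≤ ((j : Nat) : Int))) := by
      rw [List.filter_filter]
      refine List.filter_congr (fun c hc => ?_)
      rw [pv_ready_eq n (j + 1) tail c hn hk hlen' (H c hc)]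
      push_cast
      by_cases h1 : pvLevelB n c ≤ (j : Int) <;>
        by_cases h2 : pvLevelB n c ≤ (j : Int) + 1 <;>
        by_cases h3 : (j : Int) + 1 ≤ pvLevelB n c <;>
        simp [h1, h2, h3] <;> omega

    have hset : ∀ b : Int, (pvAsgOf (j + 1) tail).set j (some b) = pvAsgOf j (b :: tail) := by
      intro b
      unfold pvAsgOf
      rw [pv_set_asg j (tail.map some) (some b)]
      rfl
    have ihb : ∀ b : Int,
        pvSearchB j (cls.filter (fun c => decide (pvLevelB n c ≤ ((j : Nat) : Int))))
            (pvAsgOf j (b :: tail))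
          = pvPack (((pvAsc j).map (· ++ (b :: tail))).filter (pvBelowLe cls n j)) :=
      fun b => ih (b :: tail) (by omega) (by simp; omega)
    -- the clauses becoming fully assigned at this node
    have hpt : ∀ a ∈ (pvAsc (j + 1)).map (· ++ tail),
        pvBelowLe cls n (j + 1) a
          = ((cls.filter (fun c => decide (pvLevelB n c = ((j + 1 : Nat) : Int)))).all
                (fun c => c.any (pvLitB (pvAsgOf (j + 1) tail)))
              && pvBelowLe cls n j a) := by
      intro a ha
      obtain ⟨p, hp, rfl⟩ := List.mem_map.mp ha
      have hplen : p.length = j + 1 := pv_asc_len (j + 1) p hp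
      unfold pvBelowLe
      rw [List.all_filter, ← pv_all_and]
      refine pv_all_congr (fun c hc => ?_)
      push_cast
      by_cases hlv : pvLevelB n c = (j : Int) + 1
      · have hev := pv_eval_ready n (j + 1) tail p c hplen hlen' (H c hc)
          (by push_cast; omega)
        have h2 : ¬ pvLevelB n c ≤ (j : Int) := by omega
        have h3 : pvLevelB n c ≤ (j : Int) + 1 := by omega
        simp [hlv, hev]
      · by_cases h1 : pvLevelB n c ≤ (j : Int)
        · have h2 : pvLevelB n c ≤ (j : Int) + 1 := by omega
          simp [hlv, h1, h2]
        · have h2 : ¬ pvLevelB n c ≤ (j : Int) + 1 := by omega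
          simp [hlv, h1, h2]
    have hasc : (pvAsc (j + 1)).map (· ++ tail)
        = ((pvAsc j).map (· ++ ((0 : Int) :: tail))) ++ ((pvAsc j).map (· ++ ((1 : Int) :: tail))) := by
      show ((pvAsc j).map (· ++ [(0 : Int)]) ++ (pvAsc j).map (· ++ [(1 : Int)])).map (· ++ tail) = _
      rw [List.map_append, List.map_map, List.map_map]
      congr 1 <;> exact List.map_congr_left (fun p _ => by simp)
    show (if _ then _ else _) = _
    rw [hAF, pv_any_not, hRest]
    rw [hasc, List.filter_append,
        List.filter_congr (fun a ha => hpt a (by rw [hasc]; exact List.mem_append_left _ ha)),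
        List.filter_congr (fun a ha => hpt a (by rw [hasc]; exact List.mem_append_right _ ha))]
    by_cases hall : (cls.filter (fun c => decide (pvLevelB n c = ((j + 1 : Nat) : Int)))).all
        (fun c => c.any (pvLitB (pvAsgOf (j + 1) tail))) = true
    · rw [hall]
      simp only [Bool.not_true, Bool.false_eq_true, if_false, hset, ihb]
      simp [pvPack]
    · rw [Bool.not_eq_true] at hall
      rw [hall]
      simp [pvPack]


-- ===== VERDICT (by name: the statement is the Claim_ definition above) =====
theorem count_solutions_exact_spec : Claim_equal_count_solutions_exact := by
  unfold Claim_equal_count_solutions_exact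
  intro cvars csigns n _ hpre
  obtain ⟨hn, hrng⟩ := hpre
  unfold Spec_count_solutions_exact count_solutions_exact_alt
  set cls := (cvars.zip csigns).map (fun p => p.1.zip p.2) with hcls
  have hH : ∀ c ∈ cls, ∀ l ∈ c, -n ≤ l.1 ∧ l.1 < n := by
    intro c hc
    rw [hcls] at hc
    obtain ⟨p, hp, rfl⟩ := List.mem_map.mp hc
    exact hrng p hp
  have hNn : ((n.toNat : Nat) : Int) = n := Int.toNat_of_nonneg hn
  have hfe : cls = cls.filter (fun c => decide (pvLevelB n c ≤ ((n.toNat : Nat) : Int))) := by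
    refine (List.filter_eq_self.mpr (fun c hc => ?_)).symm
    rw [hNn]
    exact decide_eq_true (pv_level_le n hn c (hH c hc))
  have hasg : List.replicate n.toNat (none : Option Int) = pvAsgOf n.toNat [] := by
    simp [pvAsgOf]
  rw [pv_A_eq cvars csigns n hn]
  conv_rhs => rw [hfe, hasg]
  rw [pv_searchSpec cls n hn hH n.toNat [] le_rfl (by simp)]
  have hmapnil : (pvAsc n.toNat).map (· ++ ([] : List Int)) = pvAsc n.toNat := by simp
  rw [hmapnil]
  congr 1
  refine List.filter_congr (fun a _ => ?_)
  unfold pvBelowLe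
  rw [show (cvars.zip csigns).all (fun p => pvEvalC a (p.1.zip p.2)) = cls.all (pvEvalC a) by
    rw [hcls, List.all_map]; rfl]
  refine pv_all_congr (fun c hc => ?_)
  have hle : pvLevelB n c ≤ n := pv_level_le n hn c (hH c hc)
  simp
  intro h _
  exact absurd h (by omega)
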